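-- pv_equiv track=rewrite | github.com/posl/comment_recommendation | script/split_gen/5_time/zh/251_B/9.py | get_good_nums
-- ===== SOURCE A (Python) =====
-- def get_good_nums(N, W, A):
--     A.sort()
--     A.reverse()
--     max_a = A[0]
--     if max_a >= W:
--         return W
--     good_nums = [0] * (W+1)
--     good_nums[0] = 1
--     for i in range(N):
--         for j in range(W+1):
--             if good_nums[j] == 1:
--                 if j + A[i] <= W:
--                     good_nums[j+A[i]] = 1
--     return sum(good_nums)
-- ===== SOURCE B (Python) =====
-- def get_good_nums(N, W, A):
--     # Return-value equivalent to A (A also sorts its argument in place; B does not mutate A).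
--     S = sorted(A)[::-1]
--     if S[0] >= W:
--         return W
--     coins = S[:N]
--     good = [1]
--     for j in range(1, W + 1):
--         good.append(1 if any(a <= j and good[j - a] == 1 for a in coins) else 0)
--     return sum(good)
-- ===== Notes on version B (the rewrite author's own statement) =====
-- stated objective: alternative
-- what changed: B replaces A's N forward in-place propagation passes over the whole table (one pass per coin) by a single outer loop over target sums 1..W that decides each entry with a backward first-match lookup over the coins, building the table left to right.
-- outside the precondition, e.g. on get_good_nums(2, 10, [-2, 3]): A returns 7, B raises IndexError; on get_good_nums(-1, 5, [1, 3]): A returns 1, B returns 2; on get_good_nums(1, 5, [0]): A returns 1, B raises IndexError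
import Mathlib
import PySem

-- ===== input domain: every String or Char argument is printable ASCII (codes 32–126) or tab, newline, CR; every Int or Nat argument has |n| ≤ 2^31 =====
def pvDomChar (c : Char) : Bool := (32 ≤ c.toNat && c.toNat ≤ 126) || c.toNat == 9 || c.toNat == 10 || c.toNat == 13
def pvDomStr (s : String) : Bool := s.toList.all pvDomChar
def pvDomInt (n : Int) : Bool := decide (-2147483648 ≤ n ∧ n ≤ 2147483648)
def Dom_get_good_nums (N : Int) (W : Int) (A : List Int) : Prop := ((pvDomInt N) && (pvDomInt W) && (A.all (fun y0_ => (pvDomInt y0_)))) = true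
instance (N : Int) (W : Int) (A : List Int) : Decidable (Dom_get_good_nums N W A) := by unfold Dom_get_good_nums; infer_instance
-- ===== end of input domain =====

-- B inverts A's DP: one outer loop over target sums 1..W with a backward lookup over the coins,
-- instead of A's N forward propagation passes over the whole table (objective: alternative).
-- Return-value equivalence only: A sorts its argument in place, B does not mutate it.

-- ===== PORT A =====
-- A.sort(); A.reverse(); max_a = A[0]  (A[0] on an empty A raises IndexError: outside Pre_,
-- pyGetD's default is never the returned value there; good_nums[0]=1 on W+1 ≤ 0 likewise)
def get_good_nums (N : Int) (W : Int) (A : List Int) : Int :=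
  let S := (PySem.List.sorted A (fun x => x) false).reverse
  let max_a := PySem.List.pyGetD S 0 0
  if W ≤ max_a then W
  else
    let g0 := PySem.List.pySetD (List.replicate (W + 1).toNat (0 : Int)) 0 1
    let gf := (PySem.List.pyRange 0 N).foldl (fun g i =>
        (PySem.List.pyRange 0 (W + 1)).foldl (fun g j =>
          if PySem.List.pyGetD g j 0 = 1 then
            (if j + PySem.List.pyGetD S i 0 ≤ W then
              PySem.List.pySetD g (j + PySem.List.pyGetD S i 0) 1
            else g)
          else g) g) g0
    gf.sum

-- ===== PORT B =====
-- S = sorted(A)[::-1]; good[j - a] raises IndexError for a ≤ 0 in Python: outside Pre_,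
-- pyGetD's default never decides the value (false && _) inside Pre_
def get_good_nums_alt (N : Int) (W : Int) (A : List Int) : Int :=
  let S := (PySem.List.slice? (PySem.List.sorted A (fun x => x) false) none none (-1)).getD []
  if PySem.List.pyGetD S 0 0 ≥ W then W
  else
    let coins := PySem.List.slice S none (some N)
    let good := (PySem.List.pyRange 1 (W + 1)).foldl (fun good j =>
        good ++ [if coins.any (fun a => decide (a ≤ j) && (PySem.List.pyGetD good (j - a) 0 == 1)) then (1 : Int) else 0]) [1]
    good.sum

-- ===== PRECONDITION & SPEC =====
-- Pre_ requires a nonempty A and — unless some element already reaches W, where both programs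
-- return W at once — 0 ≤ N ≤ len(A) and strictly positive weights: A's values on the excluded
-- inputs (negative-index wraparound writes for negative weights, silent no-ops for zero weights,
-- an accidental empty coin prefix for negative N) are artefacts of its implementation, and A
-- raises IndexError on an empty A or on N > len(A); B raises or returns the natural value there.
def Pre_get_good_nums (N : Int) (W : Int) (A : List Int) : Prop :=
  A ≠ [] ∧ ((∃ a ∈ A, W ≤ a) ∨ (0 ≤ N ∧ N ≤ (A.length : Int) ∧ ∀ a ∈ A, 1 ≤ a))
instance (N : Int) (W : Int) (A : List Int) : Decidable (Pre_get_good_nums N W A) := by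
  unfold Pre_get_good_nums; infer_instance

def pvWitness_get_good_nums : Int × Int × List Int := (2, 6, [1, 3])

def Spec_get_good_nums (N : Int) (W : Int) (A : List Int) (out : Int) : Prop := out = get_good_nums_alt N W A
instance (N : Int) (W : Int) (A : List Int) (out : Int) : Decidable (Spec_get_good_nums N W A out) := by unfold Spec_get_good_nums; infer_instance

-- ===== CLAIM (what is proved, stated in full; the proofs are below) =====
def Claim_equal_get_good_nums : Prop := ∀ (N : Int) (W : Int) (A : List Int), Dom_get_good_nums N W A → Pre_get_good_nums N W A → Spec_get_good_nums N W A (get_good_nums N W A)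

-- ===== LEMMAS AND PROOFS =====

def stepN (W' c : Nat) (g : List Int) (j : Nat) : List Int :=
  if g.getD j 0 = 1 then (if j + c ≤ W' then g.set (j + c) 1 else g) else g

def passN (W' c : Nat) (g : List Int) : List Int := (List.range (W' + 1)).foldl (stepN W' c) g

theorem length_stepN (W' c : Nat) (g : List Int) (j : Nat) : (stepN W' c g j).length = g.length := by
  unfold stepN; split_ifs <;> simp

theorem length_foldl_stepN (W' c : Nat) (l : List Nat) : ∀ g : List Int, (l.foldl (stepN W' c) g).length = g.length := by
  induction l with
  | nil => intro g; rfl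
  | cons x xs ih => intro g; simp only [List.foldl_cons]; rw [ih, length_stepN]

theorem length_passN (W' c : Nat) (g : List Int) : (passN W' c g).length = g.length :=
  length_foldl_stepN W' c _ g

theorem getD_set_eq (l : List Int) (i t : Nat) (v : Int) (hi : i < l.length) :
    (l.set i v).getD t 0 = if t = i then v else l.getD t 0 := by
  simp only [List.getD_eq_getElem?_getD, List.getElem?_set]
  by_cases h : t = i
  · subst h; simp [hi]
  · have h2 : ¬ i = t := fun h' => h h'.symm
    rw [if_neg h2, if_neg h]

theorem passN_inv {W' c : Nat} (hc : 1 ≤ c) (g : List Int) (hg : g.length = W' + 1) :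
    ∀ k, k ≤ W' + 1 → ∀ t,
    (((List.range k).foldl (stepN W' c) g).getD t 0 = 1 ↔
      ∃ m : Nat, m * c ≤ t ∧ g.getD (t - m * c) 0 = 1 ∧ (m = 0 ∨ (t ≤ W' ∧ t < k + c))) := by
  intro k
  induction k with
  | zero =>
    intro _ t
    simp only [List.range_zero, List.foldl_nil]
    constructor
    · intro h; exact ⟨0, by simp, by simpa using h, Or.inl rfl⟩
    · rintro ⟨m, hm1, hm2, hm3⟩
      rcases m with _ | m
      · simpa using hm2
      · have h1 : c ≤ (m + 1) * c := Nat.le_mul_of_pos_left c (Nat.succ_pos m)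
        rcases hm3 with h | ⟨_, h⟩
        · omega
        · omega
  | succ k ih =>
    intro hk t
    have hk' : k ≤ W' + 1 := by omega
    have hkW : k ≤ W' := by omega
    have ihk := ih hk'
    rw [List.range_succ, List.foldl_append, List.foldl_cons, List.foldl_nil]
    set gk := (List.range k).foldl (stepN W' c) g with hgk
    have hlen : gk.length = W' + 1 := by rw [hgk, length_foldl_stepN, hg]
    simp only [stepN]
    by_cases hb : gk.getD k 0 = 1
    · by_cases hle : k + c ≤ W'
      · rw [if_pos hb, if_pos hle]
        by_cases ht : t = k + c
        · subst ht
          rw [getD_set_eq gk (k + c) (k + c) 1 (by omega), if_pos rfl]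
          constructor
          · intro _
            rcases (ihk k).mp hb with ⟨m, hm1, hm2, hm3⟩
            refine ⟨m + 1, ?_, ?_, Or.inr ⟨hle, by omega⟩⟩
            · rw [Nat.succ_mul]; omega
            · rw [Nat.succ_mul]
              have : k + c - (m * c + c) = k - m * c := by omega
              rw [this]; exact hm2
          · intro _; rfl
        · rw [getD_set_eq gk (k + c) t 1 (by omega), if_neg ht, ihk t]
          apply exists_congr; intro m
          constructor
          · rintro ⟨h1, h2, h3⟩; exact ⟨h1, h2, by omega⟩
          · rintro ⟨h1, h2, h3⟩; exact ⟨h1, h2, by omega⟩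
      · rw [if_pos hb, if_neg hle]
        rw [ihk t]
        apply exists_congr; intro m
        constructor
        · rintro ⟨h1, h2, h3⟩; exact ⟨h1, h2, by omega⟩
        · rintro ⟨h1, h2, h3⟩
          refine ⟨h1, h2, ?_⟩
          rcases h3 with h | ⟨h4, h5⟩
          · exact Or.inl h
          · -- need t < k + c; if t = k + c then t ≤ W' contradicts hle... t could be k+c with t ≤ W' → k+c ≤ W' contra
            right; constructor; · exact h4
            rcases Nat.lt_or_ge t (k + c) with h6 | h6
            · exact h6
            · omega
    · rw [if_neg hb]
      rw [ihk t]
      apply exists_congr; intro m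
      constructor
      · rintro ⟨h1, h2, h3⟩; exact ⟨h1, h2, by omega⟩
      · rintro ⟨h1, h2, h3⟩
        refine ⟨h1, h2, ?_⟩
        rcases h3 with h | ⟨h4, h5⟩
        · exact Or.inl h
        · rcases Nat.lt_or_ge t (k + c) with h6 | h6
          · exact Or.inr ⟨h4, h6⟩
          · -- t = k + c: if m = 0 we are done, otherwise gk[k] = 1 contradicts hb
            have ht : t = k + c := by omega
            rcases m with _ | m
            · exact Or.inl rfl
            · exfalso
              have hmc : c ≤ (m + 1) * c := Nat.le_mul_of_pos_left c (Nat.succ_pos m)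
              apply hb
              rw [ihk k]
              refine ⟨m, ?_, ?_, ?_⟩
              · rw [Nat.succ_mul] at h1; omega
              · have : k - m * c = t - (m + 1) * c := by rw [Nat.succ_mul]; omega
                rw [this]; exact h2
              · rcases m with _ | m'
                · exact Or.inl rfl
                · exact Or.inr ⟨by omega, by omega⟩

theorem passN_char {W' c : Nat} (hc : 1 ≤ c) (g : List Int) (hg : g.length = W' + 1) (t : Nat) :
    ((passN W' c g).getD t 0 = 1 ↔ ∃ m : Nat, m * c ≤ t ∧ g.getD (t - m * c) 0 = 1 ∧ (m = 0 ∨ t ≤ W')) := by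
  rw [passN, passN_inv hc g hg (W' + 1) le_rfl t]
  apply exists_congr; intro m
  constructor
  · rintro ⟨h1, h2, h3⟩; exact ⟨h1, h2, by omega⟩
  · rintro ⟨h1, h2, h3⟩
    refine ⟨h1, h2, ?_⟩
    rcases h3 with h | h
    · exact Or.inl h
    · exact Or.inr ⟨h, by omega⟩

inductive ReachN (D : List Nat) : Nat → Prop
  | zero : ReachN D 0
  | step {s d : Nat} : ReachN D s → d ∈ D → ReachN D (s + d)

def foldA (W' : Nat) (D : List Nat) (g : List Int) : List Int := D.foldl (fun g c => passN W' c g) g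

def MC (W' : Nat) : List Nat → Nat → Nat → Prop
  | [], t, s => s = t
  | c :: L, t, s => ∃ s' m, MC W' L t s' ∧ m * c ≤ s' ∧ (m = 0 ∨ s' ≤ W') ∧ s = s' - m * c

theorem length_foldA (W' : Nat) (D : List Nat) : ∀ g : List Int, (foldA W' D g).length = g.length := by
  induction D with
  | nil => intro g; rfl
  | cons c L ih =>
    intro g
    show (foldA W' L (passN W' c g)).length = g.length
    rw [ih, length_passN]

theorem foldA_char {W' : Nat} {D : List Nat} (hD : ∀ d ∈ D, 1 ≤ d) :
    ∀ g : List Int, g.length = W' + 1 → ∀ t,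
    ((foldA W' D g).getD t 0 = 1 ↔ ∃ s, MC W' D t s ∧ g.getD s 0 = 1) := by
  induction D with
  | nil =>
    intro g hg t
    show (g.getD t 0 = 1 ↔ _)
    constructor
    · intro h; exact ⟨t, rfl, h⟩
    · rintro ⟨s, hs, h⟩; rw [show s = t from hs] at h; exact h
  | cons c L ih =>
    intro g hg t
    have hc : 1 ≤ c := hD c List.mem_cons_self
    have hL : ∀ d ∈ L, 1 ≤ d := fun d hd => hD d (List.mem_cons_of_mem c hd)
    show ((foldA W' L (passN W' c g)).getD t 0 = 1 ↔ _)
    rw [ih hL (passN W' c g) (by rw [length_passN, hg]) t]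
    constructor
    · rintro ⟨s', hmc, hval⟩
      rw [passN_char hc g hg s'] at hval
      rcases hval with ⟨m, hm1, hm2, hm3⟩
      exact ⟨s' - m * c, ⟨s', m, hmc, hm1, by omega, rfl⟩, hm2⟩
    · rintro ⟨s, ⟨s', m, hmc, hm1, hm2, hs⟩, hval⟩
      refine ⟨s', hmc, ?_⟩
      rw [passN_char hc g hg s']
      exact ⟨m, hm1, by rw [← hs]; exact hval, by omega⟩

theorem MC_le {W' : Nat} : ∀ {D : List Nat} {t s : Nat}, MC W' D t s → s ≤ t := by
  intro D
  induction D with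
  | nil => intro t s h; exact le_of_eq h
  | cons c L ih =>
    rintro t s ⟨s', m, hmc, _, _, hs⟩
    have := ih hmc
    omega

theorem reach_mono {D : List Nat} {c : Nat} {n : Nat} (h : ReachN D n) : ReachN (c :: D) n := by
  induction h with
  | zero => exact ReachN.zero
  | step h1 h2 ih => exact ReachN.step ih (List.mem_cons_of_mem c h2)

theorem reach_add_mul {D : List Nat} {c : Nat} (hc : c ∈ D) (n : Nat) :
    ∀ m : Nat, ReachN D n → ReachN D (n + m * c) := by
  intro m
  induction m with
  | zero => intro h; simpa using h
  | succ m ih =>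
    intro h
    have := ReachN.step (ih h) hc
    have heq : n + m * c + c = n + (m + 1) * c := by rw [Nat.succ_mul]; omega
    rwa [heq] at this

theorem MC_reach {W' : Nat} : ∀ {D : List Nat} {t s : Nat}, MC W' D t s → ReachN D (t - s) := by
  intro D
  induction D with
  | nil => intro t s h; rw [h]; simpa using ReachN.zero
  | cons c L ih =>
    rintro t s ⟨s', m, hmc, hm1, _, hs⟩
    have h1 : ReachN L (t - s') := ih hmc
    have h2 : ReachN (c :: L) (t - s') := reach_mono h1
    have h3 := reach_add_mul (List.mem_cons_self) (t - s') m h2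
    have hle := MC_le hmc
    have heq : t - s' + m * c = t - s := by omega
    rwa [heq] at h3

theorem reach_nil {n : Nat} (h : ReachN [] n) : n = 0 := by
  induction h with
  | zero => rfl
  | step _ h2 _ => exact absurd h2 (List.not_mem_nil)

theorem reach_extract {c : Nat} {L : List Nat} {n : Nat} (h : ReachN (c :: L) n) :
    ∃ m n', n = n' + m * c ∧ ReachN L n' := by
  induction h with
  | zero => exact ⟨0, 0, by omega, ReachN.zero⟩
  | step h1 h2 ih =>
    rcases ih with ⟨m, n', heq, hr⟩
    rcases List.mem_cons.mp h2 with hd | hd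
    · exact ⟨m + 1, n', by rw [Nat.succ_mul]; omega, hr⟩
    · exact ⟨m, n' + _, by omega, ReachN.step hr hd⟩

theorem reach_MC {W' : Nat} : ∀ {D : List Nat} {t s n : Nat}, ReachN D n → t ≤ W' → s ≤ t →
    n = t - s → MC W' D t s := by
  intro D
  induction D with
  | nil =>
    intro t s n hr ht hs hn
    have := reach_nil hr
    show s = t
    omega
  | cons c L ih =>
    intro t s n hr ht hs hn
    rcases reach_extract hr with ⟨m, n', heq, hr'⟩
    refine ⟨s + m * c, m, ih hr' ht (by omega) (by omega), by omega, ?_, by omega⟩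
    rcases m with _ | m
    · exact Or.inl rfl
    · exact Or.inr (by omega)

def tblN (D : List Nat) : Nat → List Int
  | 0 => [1]
  | n + 1 =>
      let g := tblN D n
      g ++ [if D.any (fun d => decide (d ≤ n + 1) && (g.getD (n + 1 - d) 0 == 1)) then (1 : Int) else 0]

theorem length_tblN (D : List Nat) : ∀ n : Nat, (tblN D n).length = n + 1 := by
  intro n
  induction n with
  | zero => rfl
  | succ n ih => show (tblN D n ++ [_]).length = n + 2; simp [ih]

theorem getD_append_lt (g : List Int) (x : Int) {t : Nat} (h : t < g.length) :
    (g ++ [x]).getD t 0 = g.getD t 0 := by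
  simp [List.getD_eq_getElem?_getD, List.getElem?_append_left h]

theorem getD_append_self (g : List Int) (x : Int) {t : Nat} (h : t = g.length) :
    (g ++ [x]).getD t 0 = x := by
  subst h
  simp [List.getD_eq_getElem?_getD]

theorem getD_of_le (g : List Int) {t : Nat} (h : g.length ≤ t) : g.getD t 0 = 0 := by
  simp [List.getD_eq_getElem?_getD, List.getElem?_eq_none_iff.mpr h]

theorem reach_last {D : List Nat} {n : Nat} (h : ReachN D n) (hn : n ≠ 0) :
    ∃ s d, d ∈ D ∧ ReachN D s ∧ n = s + d := by
  cases h with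
  | zero => exact absurd rfl hn
  | step hs hd => exact ⟨_, _, hd, hs, rfl⟩

theorem tblN_char {D : List Nat} (hD : ∀ d ∈ D, 1 ≤ d) :
    ∀ n : Nat, ∀ t ≤ n, ((tblN D n).getD t 0 = 1 ↔ ReachN D t) := by
  intro n
  induction n with
  | zero =>
    intro t ht
    have h0 : t = 0 := by omega
    subst h0
    simp only [tblN, List.getD]
    constructor
    · intro _; exact ReachN.zero
    · intro _; rfl
  | succ n ih =>
    intro t ht
    show ((tblN D n ++ [_]).getD t 0 = 1 ↔ _)
    rcases Nat.lt_or_ge t (n + 1) with hlt | hge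
    · rw [getD_append_lt _ _ (by rw [length_tblN]; omega)]
      exact ih t (by omega)
    · have heq : t = n + 1 := by omega
      subst heq
      rw [getD_append_self _ _ (by rw [length_tblN])]
      constructor
      · intro hval
        by_cases hany : D.any (fun d => decide (d ≤ n + 1) && ((tblN D n).getD (n + 1 - d) 0 == 1)) = true
        · rcases List.any_eq_true.mp hany with ⟨d, hd, hcond⟩
          rcases Bool.and_eq_true_iff.mp hcond with ⟨h1, h2⟩
          have hd1 := hD d hd
          have hdle : d ≤ n + 1 := of_decide_eq_true h1
          have hgd : (tblN D n).getD (n + 1 - d) 0 = 1 := by simpa using h2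
          have hr := ReachN.step ((ih (n + 1 - d) (by omega)).mp hgd) hd
          rwa [show n + 1 - d + d = n + 1 by omega] at hr
        · rw [if_neg hany] at hval
          exact absurd hval (by norm_num)
      · intro hr
        rcases reach_last hr (by omega) with ⟨s, d, hd, hs, heq⟩
        · have hd1 := hD d hd
          have hsn : s ≤ n := by omega
          rw [if_pos ?_]
          apply List.any_eq_true.mpr
          refine ⟨d, hd, ?_⟩
          apply Bool.and_eq_true_iff.mpr
          refine ⟨decide_eq_true (by omega), ?_⟩
          have : (tblN D n).getD (n + 1 - d) 0 = 1 := by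
            rw [show n + 1 - d = s by omega]
            exact (ih s hsn).mpr hs
          simpa using this

theorem tblN_succ (D : List Nat) (n : Nat) :
    tblN D (n + 1) = tblN D n ++
      [if D.any (fun d => decide (d ≤ n + 1) && ((tblN D n).getD (n + 1 - d) 0 == 1)) then (1 : Int) else 0] := rfl

theorem tblN_01 (D : List Nat) (n : Nat) : ∀ t : Nat, (tblN D n).getD t 0 = 0 ∨ (tblN D n).getD t 0 = 1 := by
  induction n with
  | zero =>
    intro t
    rcases t with _ | t
    · exact Or.inr rfl
    · left; apply getD_of_le; simp [tblN]
  | succ n ih =>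
    intro t
    rw [tblN_succ]
    rcases Nat.lt_trichotomy t (n + 1) with hlt | heq | hgt
    · rw [getD_append_lt _ _ (by rw [length_tblN]; omega)]; exact ih t
    · rw [getD_append_self _ _ (by rw [length_tblN]; omega)]
      split_ifs
      · exact Or.inr rfl
      · exact Or.inl rfl
    · left; apply getD_of_le; simp [length_tblN]; omega

theorem stepN_01 (W' c : Nat) (g : List Int) (j : Nat)
    (h : ∀ t : Nat, g.getD t 0 = 0 ∨ g.getD t 0 = 1) :
    ∀ t : Nat, (stepN W' c g j).getD t 0 = 0 ∨ (stepN W' c g j).getD t 0 = 1 := by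
  intro t
  unfold stepN
  split_ifs with h1 h2
  · rcases Nat.lt_or_ge (j + c) g.length with hin | hout
    · rw [getD_set_eq g (j + c) t 1 hin]
      split_ifs
      · exact Or.inr rfl
      · exact h t
    · rw [List.set_eq_of_length_le (by omega)]; exact h t
  · exact h t
  · exact h t

theorem foldl_stepN_01 (W' c : Nat) (l : List Nat) : ∀ g : List Int,
    (∀ t : Nat, g.getD t 0 = 0 ∨ g.getD t 0 = 1) →
    ∀ t : Nat, ((l.foldl (stepN W' c) g).getD t 0 = 0 ∨ (l.foldl (stepN W' c) g).getD t 0 = 1) := by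
  induction l with
  | nil => intro g h t; exact h t
  | cons x xs ih => intro g h t; exact ih _ (stepN_01 W' c g x h) t

theorem foldA_01 (W' : Nat) (D : List Nat) : ∀ g : List Int,
    (∀ t : Nat, g.getD t 0 = 0 ∨ g.getD t 0 = 1) →
    ∀ t : Nat, ((foldA W' D g).getD t 0 = 0 ∨ (foldA W' D g).getD t 0 = 1) := by
  induction D with
  | nil => intro g h t; exact h t
  | cons c L ih => intro g h t; exact ih _ (foldl_stepN_01 W' c _ g h) t

def g0N (W' : Nat) : List Int := (List.replicate (W' + 1) (0 : Int)).set 0 1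

theorem g0N_getD (W' : Nat) (s : Nat) : (g0N W' ).getD s 0 = if s = 0 then 1 else 0 := by
  unfold g0N
  rw [getD_set_eq _ 0 s 1 (by simp)]
  split_ifs
  · rfl
  · rcases Nat.lt_or_ge s (W' + 1) with hin | hout
    · simp [List.getD_eq_getElem?_getD, hin]
    · apply getD_of_le; simp; omega

theorem g0N_01 (W' : Nat) : ∀ t : Nat, (g0N W').getD t 0 = 0 ∨ (g0N W').getD t 0 = 1 := by
  intro t; rw [g0N_getD]; split_ifs
  · exact Or.inr rfl
  · exact Or.inl rfl

theorem tables_eq {W' : Nat} {D : List Nat} (hD : ∀ d ∈ D, 1 ≤ d) :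
    foldA W' D (g0N W') = tblN D W' := by
  have hlenA : (foldA W' D (g0N W')).length = W' + 1 := by
    rw [length_foldA]; unfold g0N; simp
  have hlenB : (tblN D W').length = W' + 1 := length_tblN D W'
  apply List.ext_getElem (by omega)
  intro i h1 h2
  have hiW : i ≤ W' := by omega
  have hgetD : (foldA W' D (g0N W')).getD i 0 = (tblN D W').getD i 0 := by
    have hchA : (foldA W' D (g0N W')).getD i 0 = 1 ↔ ReachN D i := by
      rw [foldA_char hD (g0N W') (by unfold g0N; simp) i]
      constructor
      · rintro ⟨s, hmc, hval⟩
        rw [g0N_getD] at hval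
        have hs0 : s = 0 := by by_contra h; rw [if_neg h] at hval; norm_num at hval
        subst hs0
        simpa using MC_reach hmc
      · intro hr
        refine ⟨0, reach_MC hr hiW (by omega) (by omega), ?_⟩
        rw [g0N_getD]; rfl
    have hchB : (tblN D W').getD i 0 = 1 ↔ ReachN D i := tblN_char hD W' i hiW
    rcases foldA_01 W' D (g0N W') (g0N_01 W') i with hA | hA <;>
      rcases tblN_01 D W' i with hB | hB
    · rw [hA, hB]
    · exact absurd (hchA.mpr (hchB.mp hB)) (by rw [hA]; norm_num)
    · exact absurd (hchB.mpr (hchA.mp hA)) (by rw [hB]; norm_num)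
    · rw [hA, hB]
  rwa [List.getD_eq_getElem _ _ h1, List.getD_eq_getElem _ _ h2] at hgetD


-- ===== glue between the ports and the Nat-level models =====

def innerA (W : Int) (g : List Int) (c : Int) : List Int :=
  (PySem.List.pyRange 0 (W + 1)).foldl (fun g j =>
    if PySem.List.pyGetD g j 0 = 1 then
      (if j + c ≤ W then PySem.List.pySetD g (j + c) 1 else g)
    else g) g

theorem portA_eq (N W : Int) (A : List Int) :
    get_good_nums N W A =
      (let S := (PySem.List.sorted A (fun x => x) false).reverse
       if W ≤ PySem.List.pyGetD S 0 0 then W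
       else ((PySem.List.pyRange 0 N).foldl
          (fun g i => innerA W g (PySem.List.pyGetD S i 0))
          (PySem.List.pySetD (List.replicate (W + 1).toNat (0 : Int)) 0 1)).sum) := rfl

theorem portB_eq (N W : Int) (A : List Int) :
    get_good_nums_alt N W A =
      (let S := (PySem.List.sorted A (fun x => x) false).reverse
       if W ≤ PySem.List.pyGetD S 0 0 then W
       else ((PySem.List.pyRange 1 (W + 1)).foldl
          (fun good j => good ++ [if (PySem.List.slice S none (some N)).any
              (fun a => decide (a ≤ j) && (PySem.List.pyGetD good (j - a) 0 == 1)) then (1 : Int) else 0])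
          [1]).sum) := by
  unfold get_good_nums_alt
  rw [PySem.List.slice?_none_none_neg_one]
  rfl

theorem innerA_eq_passN {W : Int} {W' : Nat} (hW : W = (W' : Int)) {c : Int} (hc : 1 ≤ c) (g : List Int) :
    innerA W g c = passN W' c.toNat g := by
  unfold innerA passN
  rw [show W + 1 = ((W' + 1 : Nat) : Int) by omega]
  rw [PySem.List.pyRange_zero_nat, List.foldl_map]
  apply PySem.List.foldl_congr_mem
  intro g' k _
  simp only [PySem.List.pyGetD_natCast]
  unfold stepN
  by_cases h1 : g'.getD k 0 = 1
  · rw [if_pos h1, if_pos h1]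
    by_cases h2 : (k : Int) + c ≤ W
    · have h2' : k + c.toNat ≤ W' := by omega
      rw [if_pos h2, if_pos h2']
      rw [show (k : Int) + c = ((k + c.toNat : Nat) : Int) by omega, PySem.List.pySetD_natCast]
    · have h2' : ¬ (k + c.toNat ≤ W') := by omega
      rw [if_neg h2, if_neg h2']
  · rw [if_neg h1, if_neg h1]

theorem g0_eq_g0N {W : Int} {W' : Nat} (hW : W = (W' : Int)) :
    PySem.List.pySetD (List.replicate (W + 1).toNat (0 : Int)) 0 1 = g0N W' := by
  rw [PySem.List.pySetD_of_nonneg _ _ (by omega)]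
  unfold g0N
  rw [show (W + 1).toNat = W' + 1 by omega]
  rfl

theorem bfold {coins : List Int} (hpos : ∀ a ∈ coins, 1 ≤ a) (n : Nat) :
    (PySem.List.pyRange 1 ((n : Int) + 1)).foldl
        (fun good j => good ++ [if coins.any
            (fun a => decide (a ≤ j) && (PySem.List.pyGetD good (j - a) 0 == 1)) then (1 : Int) else 0])
        [1] = tblN (coins.map Int.toNat) n := by
  induction n with
  | zero =>
    rw [show ((0 : Nat) : Int) + 1 = 1 by norm_num, PySem.List.pyRange_one_eq_nil le_rfl]
    rfl
  | succ n ih =>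
    rw [show ((n + 1 : Nat) : Int) + 1 = ((n : Int) + 1) + 1 by push_cast; ring]
    rw [PySem.List.pyRange_one_succ_right (by omega), List.foldl_append, List.foldl_cons, List.foldl_nil]
    rw [ih, tblN_succ]
    congr 1
    have hany : coins.any (fun a => decide (a ≤ (n : Int) + 1) &&
          (PySem.List.pyGetD (tblN (coins.map Int.toNat) n) ((n : Int) + 1 - a) 0 == 1)) =
        (coins.map Int.toNat).any (fun d => decide (d ≤ n + 1) &&
          ((tblN (coins.map Int.toNat) n).getD (n + 1 - d) 0 == 1)) := by
      rw [List.any_map]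
      apply PySem.List.any_congr_mem
      intro a ha
      have ha1 : 1 ≤ a := hpos a ha
      by_cases h : a ≤ (n : Int) + 1
      · have h' : a.toNat ≤ n + 1 := by omega
        simp only [Function.comp]
        rw [decide_eq_true h, decide_eq_true h', Bool.true_and, Bool.true_and]
        rw [show (n : Int) + 1 - a = ((n + 1 - a.toNat : Nat) : Int) by omega, PySem.List.pyGetD_natCast]
      · simp only [Function.comp]
        rw [decide_eq_false h, decide_eq_false (by omega), Bool.false_and, Bool.false_and]
    rw [hany]

-- getD of a take prefix
theorem getD_take_lt (l : List Int) {n t : Nat} (h : t < n) (d : Int) :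
    (l.take n).getD t d = l.getD t d := by
  simp [List.getD_eq_getElem?_getD, List.getElem?_take_of_lt h]

-- head of sorted(A)[::-1] is the maximum of a nonempty A
theorem head_rev_sorted_max {A : List Int} (hA : A ≠ []) :
    (PySem.List.pyGetD ((PySem.List.sorted A (fun x => x) false).reverse) 0 0) ∈ A ∧
    ∀ a ∈ A, a ≤ PySem.List.pyGetD ((PySem.List.sorted A (fun x => x) false).reverse) 0 0 := by
  set T := PySem.List.sorted A (fun x => x) false with hT
  have hTlen : T.length = A.length := PySem.List.length_sorted A _ _
  have hTne : T.length ≠ 0 := by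
    intro h
    exact hA ((PySem.List.sorted_eq_nil_iff A _ _).mp (List.length_eq_zero_iff.mp h))
  rw [PySem.List.pyGetD_eq_getElem T.reverse 0 le_rfl
    (by rw [List.length_reverse]; exact_mod_cast Nat.pos_of_ne_zero hTne)]
  simp only [Int.toNat_zero]
  rw [List.getElem_reverse]
  constructor
  · exact (PySem.List.mem_sorted A _ _ _).mp (List.getElem_mem _)
  · intro a ha
    have haT : a ∈ T := (PySem.List.mem_sorted A _ _ a).mpr ha
    rcases List.mem_iff_getElem.mp haT with ⟨p, hp, hpa⟩
    rw [← hpa]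
    exact PySem.List.key_sorted_getElem_mono A (fun x => x) (by omega) (by rw [← hT]; omega)


-- ===== VERDICT (by name: the statement is the Claim_ definition above) =====
theorem get_good_nums_spec : Claim_equal_get_good_nums := by
  intro N W A _ hPre
  unfold Spec_get_good_nums
  rcases hPre with ⟨hA, hPre2⟩
  rw [portA_eq, portB_eq]
  simp only []
  set S := (PySem.List.sorted A (fun x => x) false).reverse with hS
  by_cases hW : W ≤ PySem.List.pyGetD S 0 0
  · rw [if_pos hW, if_pos hW]
  · rw [if_neg hW, if_neg hW]
    obtain ⟨hmem, hmax⟩ := head_rev_sorted_max hA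
    rcases hPre2 with ⟨a, haA, haW⟩ | ⟨hN0, hNlen, hpos⟩
    · exact absurd (le_trans haW (hmax a haA)) hW
    -- main case: 1 ≤ max < W
    have h1max : 1 ≤ PySem.List.pyGetD S 0 0 := hpos _ hmem
    have hW2 : 2 ≤ W := by omega
    set W' := W.toNat with hW'
    have hWW : W = (W' : Int) := by omega
    set coins := PySem.List.slice S none (some N) with hcoins
    have hSlen : S.length = A.length := by
      rw [hS, List.length_reverse, PySem.List.length_sorted]
    have hctake : coins = S.take N.toNat := by
      rw [hcoins, PySem.List.slice_to S hN0]
    have hclen : (coins.length : Int) = N := by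
      rw [hctake, List.length_take, hSlen]
      omega
    have hcpos : ∀ a ∈ coins, 1 ≤ a := by
      intro a ha
      apply hpos
      rw [hctake] at ha
      have := List.mem_of_mem_take ha
      rw [hS, List.mem_reverse, PySem.List.mem_sorted] at this
      exact this
    set D := coins.map Int.toNat with hD
    have hDpos : ∀ d ∈ D, 1 ≤ d := by
      intro d hd
      rcases List.mem_map.mp hd with ⟨a, ha, rfl⟩
      have := hcpos a ha
      omega
    -- A side
    have hA1 : (PySem.List.pyRange 0 N).foldl
        (fun g i => innerA W g (PySem.List.pyGetD S i 0))
        (PySem.List.pySetD (List.replicate (W + 1).toNat (0 : Int)) 0 1) = foldA W' D (g0N W') := by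
      rw [g0_eq_g0N hWW]
      have hlenfix : PySem.List.pyRange 0 N = PySem.List.pyRange 0 (PySem.List.len coins) := by
        rw [PySem.List.len, hclen]
      rw [hlenfix]
      have hcongr : (PySem.List.pyRange 0 (PySem.List.len coins)).foldl
          (fun g i => innerA W g (PySem.List.pyGetD S i 0)) (g0N W') =
          (PySem.List.pyRange 0 (PySem.List.len coins)).foldl
          (fun g i => innerA W g (PySem.List.pyGetD coins i 0)) (g0N W') := by
        apply PySem.List.foldl_congr_mem
        intro g i hi
        rw [PySem.List.mem_pyRange_one] at hi
        congr 1
        rw [show i = ((i.toNat : Nat) : Int) by omega, PySem.List.pyGetD_natCast,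
          PySem.List.pyGetD_natCast, hctake]
        exact (getD_take_lt S (by rw [PySem.List.len, hclen] at hi; omega) 0).symm
      rw [hcongr, PySem.List.foldl_pyRange_pyGetD coins 0 (innerA W) (g0N W') le_rfl]
      simp only [Int.toNat_zero, List.drop_zero]
      rw [PySem.List.foldl_congr_mem coins _ (fun g c => passN W' c.toNat g) _
        (fun g c hc => innerA_eq_passN hWW (hcpos c hc) g)]
      rw [foldA, hD, List.foldl_map]
    -- B side
    have hB1 : (PySem.List.pyRange 1 (W + 1)).foldl
        (fun good j => good ++ [if coins.any
            (fun a => decide (a ≤ j) && (PySem.List.pyGetD good (j - a) 0 == 1)) then (1 : Int) else 0])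
        [1] = tblN D W' := by
      rw [show W + 1 = ((W' : Nat) : Int) + 1 by omega]
      exact bfold hcpos W'
    rw [hA1, hB1, tables_eq hDpos]
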